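-- pv_equiv track=rewrite | github.com/981377660LMT/algorithm-study | 7_graph/经典题/枚举边或顶点/无向图四元环计数.py | countCycle4
-- ===== SOURCE A (Python) =====
-- from typing import List, Tuple
--
-- def countCycle4(n: int, edges: List[List[int]]) -> int:
--     """无向图四元环计数 边定向 O(E^3/2)"""
--     adjList1 = [[] for _ in range(n)]
--     deg = [0] * n
--     less = lambda u, v: deg[u] < deg[v] or (deg[u] == deg[v] and u < v)
--
--     res = 0
--     for u, v in edges:
--         adjList1[u].append(v)
--         adjList1[v].append(u)
--         deg[u] += 1
--         deg[v] += 1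
--
--     adjList2 = [[] for _ in range(n)]
--     for cur, nexts in enumerate(adjList1):
--         for next in nexts:
--             if less(cur, next):
--                 adjList2[cur].append(next)
--
--     count = [0] * n
--     for cur, nexts in enumerate(adjList1):
--         for next1 in nexts:
--             for next2 in adjList2[next1]:
--                 if less(cur, next2):
--                     count[cur] += 1
--                     res += count[cur]
--     return res
-- ===== SOURCE B (Python) =====
-- def countCycle4(n, edges):
--     """Sort each vertex's neighbour keys once, then count oriented wedges by binary
--     search over the sorted key lists and close each vertex with k*(k+1)//2."""
--     adjList = [[] for _ in range(n)]
--     deg = [0] * n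
--     for u, v in edges:
--         adjList[u].append(v)
--         adjList[v].append(u)
--         deg[u] += 1
--         deg[v] += 1
--     nkeys = [sorted([(deg[w], w) for w in nbrs]) for nbrs in adjList]
--     res = 0
--     for cur in range(n):
--         cx = (deg[cur], cur)
--         k = 0
--         for a in adjList[cur]:
--             t = (deg[a], a)
--             if t < cx:
--                 t = cx
--             ks = nkeys[a]
--             lo, hi = 0, len(ks)
--             while lo < hi:
--                 mid = (lo + hi) // 2
--                 if ks[mid] <= t:
--                     lo = mid + 1
--                 else:
--                     hi = mid
--             k += len(ks) - lo
--         res += k * (k + 1) // 2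
--     return res
-- ===== Notes on version B (the rewrite author's own statement) =====
-- stated objective: alternative
-- what changed: B discards A's oriented-adjacency pass and the incremental count/res accumulators: it sorts each vertex's neighbour (degree,id) keys once, counts each vertex's oriented wedges by binary search (elements above max(key(a),key(cur)) in the sorted list), and closes each vertex with the closed form k*(k+1)//2.
-- outside the precondition, e.g. on countCycle4(2, [[-1, 1], [-1, -2]]): A returns 0, B returns 1
import Mathlib
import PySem

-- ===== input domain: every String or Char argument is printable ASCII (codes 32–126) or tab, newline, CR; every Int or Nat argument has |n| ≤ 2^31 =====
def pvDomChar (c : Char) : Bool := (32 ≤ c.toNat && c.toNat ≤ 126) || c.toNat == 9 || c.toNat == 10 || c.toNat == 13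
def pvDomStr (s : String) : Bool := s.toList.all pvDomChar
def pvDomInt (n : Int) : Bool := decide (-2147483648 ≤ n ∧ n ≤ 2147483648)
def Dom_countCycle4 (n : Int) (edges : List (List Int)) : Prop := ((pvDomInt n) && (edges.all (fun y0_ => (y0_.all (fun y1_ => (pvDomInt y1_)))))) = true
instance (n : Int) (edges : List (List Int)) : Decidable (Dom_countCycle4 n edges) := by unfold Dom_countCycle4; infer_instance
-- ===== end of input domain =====

-- B replaces A's oriented-adjacency pass and incremental count/res accumulators by sorting each
-- vertex's neighbour (degree,id) keys once, counting wedges by binary search over the sorted key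
-- lists, and closing each vertex with the closed form k*(k+1)//2 (objective: alternative).

-- ===== PORT A =====
-- xs[i] = f(xs[i]) / xs[i].append(…) as read-modify-write with Python index semantics
def pvUpd {α : Type} (xs : List α) (i : Int) (d : α) (f : α → α) : List α :=
  PySem.List.pySetD xs i (f (PySem.List.pyGetD xs i d))

-- the 'less' lambda of A (closes over the final deg array)
def pvLess (deg : List Int) (u v : Int) : Bool :=
  decide (PySem.List.pyGetD deg u 0 < PySem.List.pyGetD deg v 0) ||
  (PySem.List.pyGetD deg u 0 == PySem.List.pyGetD deg v 0 && decide (u < v))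

-- the adjacency/degree building loop (textually identical in Source A and Source B, shared helper)
def pvBuild (n : Int) (edges : List (List Int)) : List (List Int) × List Int :=
  edges.foldl (fun s e =>
    match e with
    | [u, v] =>
      let a1 := pvUpd s.1 u [] (fun l => l ++ [v])
      let a2 := pvUpd a1 v [] (fun l => l ++ [u])
      let d1 := pvUpd s.2 u 0 (fun x => x + 1)
      let d2 := pvUpd d1 v 0 (fun x => x + 1)
      (a2, d2)
    | _ => s  -- Python raises ValueError (unpacking) here; excluded by Pre_
  ) (List.replicate n.toNat [], List.replicate n.toNat 0)

def countCycle4 (n : Int) (edges : List (List Int)) : Int :=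
  let built := pvBuild n edges
  let adjList1 := built.1
  let deg := built.2
  let adjList2 := (PySem.List.enumerate adjList1 0).foldl
    (fun acc p => p.2.foldl (fun acc next =>
        if pvLess deg p.1 next then pvUpd acc p.1 [] (fun l => l ++ [next]) else acc) acc)
    (List.replicate n.toNat ([] : List Int))
  let fin := (PySem.List.enumerate adjList1 0).foldl
    (fun (st : List Int × Int) p =>
      p.2.foldl (fun st next1 =>
        (PySem.List.pyGetD adjList2 next1 []).foldl (fun (st : List Int × Int) next2 =>
          if pvLess deg p.1 next2 then
            let c := pvUpd st.1 p.1 0 (fun x => x + 1)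
            (c, st.2 + PySem.List.pyGetD c p.1 0)
          else st) st) st)
    (List.replicate n.toNat (0 : Int), (0 : Int))
  fin.2

-- ===== PORT B =====
-- Python tuple comparisons (a, b) <= (c, d) and (a, b) < (c, d)
def pvLeP (p q : Int × Int) : Bool :=
  decide (p.1 < q.1) || (p.1 == q.1 && decide (p.2 ≤ q.2))

def pvLtP (p q : Int × Int) : Bool :=
  decide (p.1 < q.1) || (p.1 == q.1 && decide (p.2 < q.2))

-- Source B's hand-written binary-search while loop; lo/hi are Nat since they stay in [0, len(ks)],
-- and ks[mid] is read with getD: 0 ≤ lo ≤ mid < hi ≤ len(ks), so the index is provably in range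
def pvBS (ks : List (Int × Int)) (t : Int × Int) (lo hi : Nat) : Nat :=
  if lo < hi then
    let mid := (lo + hi) / 2
    if pvLeP (ks.getD mid (0, 0)) t then pvBS ks t (mid + 1) hi else pvBS ks t lo mid
  else lo
termination_by hi - lo
decreasing_by all_goals omega

def countCycle4_alt (n : Int) (edges : List (List Int)) : Int :=
  let built := pvBuild n edges
  let adjList := built.1
  let deg := built.2
  let nkeys := adjList.map (fun nbrs =>
    PySem.List.sorted2 (nbrs.map (fun w => (PySem.List.pyGetD deg w 0, w))) Prod.fst Prod.snd false)
  (PySem.List.pyRange 0 n 1).foldl (fun res cur =>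
    let cx : Int × Int := (PySem.List.pyGetD deg cur 0, cur)
    let k := (PySem.List.pyGetD adjList cur []).foldl (fun k a =>
      let t0 : Int × Int := (PySem.List.pyGetD deg a 0, a)
      let t := if pvLtP t0 cx then cx else t0
      let ks := PySem.List.pyGetD nkeys a []
      let lo := pvBS ks t 0 ks.length
      k + ((ks.length : Int) - (lo : Int))) 0
    res + PySem.Int.floordiv (k * (k + 1)) 2) 0

-- ===== PRECONDITION & SPEC =====
-- Pre_ restricts to the task's natural domain: every edge a pair of vertices in [0, n).
-- Excluded: edges that are not pairs (A raises ValueError) and endpoints outside [0, n)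
-- (endpoints ≥ n or < -n raise IndexError; negative in-range endpoints hit Python's
-- negative-index wraparound, an accident of A's implementation that B does not reproduce).
def Pre_countCycle4 (n : Int) (edges : List (List Int)) : Prop :=
  ∀ e ∈ edges, e.length = 2 ∧ ∀ x ∈ e, 0 ≤ x ∧ x < n

instance (n : Int) (edges : List (List Int)) : Decidable (Pre_countCycle4 n edges) := by
  unfold Pre_countCycle4; infer_instance

def pvWitness_countCycle4 : Int × List (List Int) := (4, [[0, 1], [1, 2], [2, 3], [3, 0], [0, 2]])

def Spec_countCycle4 (n : Int) (edges : List (List Int)) (out : Int) : Prop := out = countCycle4_alt n edges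
instance (n : Int) (edges : List (List Int)) (out : Int) : Decidable (Spec_countCycle4 n edges out) := by unfold Spec_countCycle4; infer_instance

-- ===== CLAIM (what is proved, stated in full; the proofs are below) =====
def Claim_equal_countCycle4 : Prop := ∀ (n : Int) (edges : List (List Int)), Dom_countCycle4 n edges → Pre_countCycle4 n edges → Spec_countCycle4 n edges (countCycle4 n edges)

-- ===== LEMMAS AND PROOFS =====

theorem pvUpd_natCast {α : Type} (xs : List α) (j : Nat) (d : α) (f : α → α) :
    pvUpd xs (j:Int) d f = xs.set j (f (xs.getD j d)) := by simp [pvUpd]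

theorem pv_length_pvUpd {α : Type} (xs : List α) (i : Int) (d : α) (f : α → α) :
    (pvUpd xs i d f).length = xs.length := by simp [pvUpd]

theorem pv_getD_set {α : Type} (xs : List α) (j k : Nat) (v d : α) (hj : j < xs.length) :
    (xs.set j v).getD k d = if k = j then v else xs.getD k d := by
  by_cases h : k = j
  · subst h; simp [List.getD, hj]
  · simp [List.getD, h, Ne.symm h]

theorem pv_getD_replicate {α : Type} (m k : Nat) (x : α) :
    (List.replicate m x).getD k x = x := by
  rcases Nat.lt_or_ge k m with h | h
  · simp [List.getD, h]
  · simp [List.getD, List.getElem?_eq_none (by simp; omega : (List.replicate m x).length ≤ k)]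

-- Gauss helper

def pvT (k : Int) : Int := PySem.Int.floordiv (k * (k + 1)) 2

def pvS (c0 : Int) : Nat → Int
  | 0 => 0
  | m + 1 => (c0 + 1) + pvS (c0 + 1) m

theorem pvS_shift (m : Nat) : ∀ c0 : Int, pvS c0 m = (m : Int) * c0 + pvS 0 m := by
  induction m with
  | zero => intro c0; simp [pvS]
  | succ m ih =>
    intro c0
    rw [pvS, pvS, ih (c0 + 1), ih (0 + 1)]
    push_cast; ring

theorem pvT_natCast (m : Nat) : pvT (m : Int) = ((m * (m + 1) / 2 : Nat) : Int) := by
  have : ((m : Int) * ((m : Int) + 1)) = ((m * (m + 1) : Nat) : Int) := by push_cast; ring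
  rw [pvT, this]
  exact_mod_cast PySem.Int.floordiv_natCast (m * (m + 1)) 2

theorem pvS_zero (m : Nat) : pvS 0 m = pvT (m : Int) := by
  induction m with
  | zero => simp [pvS, pvT, PySem.Int.floordiv]
  | succ m ih =>
    rw [pvS, pvS_shift m (0 + 1), ih, pvT_natCast, pvT_natCast]
    have e : (m + 1) * (m + 1 + 1) = m * (m + 1) + (m + 1) * 2 := by ring
    have : (m + 1) * (m + 1 + 1) / 2 = m * (m + 1) / 2 + (m + 1) := by
      rw [e, Nat.add_mul_div_right _ _ (by norm_num : (0:Nat) < 2)]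
    rw [this]; push_cast; ring

-- the adjList2 inner fold: append all passing elements at fixed index jc

theorem pvInnerApp (jc : Nat) (q : Int → Bool) :
    ∀ (L : List Int) (acc : List (List Int)), jc < acc.length →
      L.foldl (fun acc nx => if q nx then pvUpd acc (jc : Int) [] (fun l => l ++ [nx]) else acc) acc
        = acc.set jc (acc.getD jc [] ++ L.filter q) := by
  intro L
  induction L with
  | nil =>
    intro acc hj
    simp [List.getD, hj]
  | cons x L ih =>
    intro acc hj
    rw [List.foldl_cons]
    by_cases hx : q x
    · rw [if_pos hx, pvUpd_natCast, ih _ (by simpa using hj)]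
      rw [List.set_set, pv_getD_set _ jc jc _ _ hj]
      simp [hx, List.append_assoc]
    · rw [if_neg hx, ih _ hj]
      simp [hx]

-- A's innermost loop over one flattened candidate list, with running count/res

theorem pvLoopInner (deg : List Int) (jc : Nat) :
    ∀ (L : List Int) (cnt : List Int) (res : Int), jc < cnt.length →
      L.foldl (fun (st : List Int × Int) nx2 =>
          if pvLess deg ((jc : Nat) : Int) nx2 then
            let c := pvUpd st.1 ((jc : Nat) : Int) 0 (fun x => x + 1)
            (c, st.2 + PySem.List.pyGetD c ((jc : Nat) : Int) 0)
          else st) (cnt, res)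
        = (cnt.set jc (cnt.getD jc 0 + (L.countP (fun x => pvLess deg ((jc : Nat) : Int) x) : Int)),
           res + pvS (cnt.getD jc 0) (L.countP (fun x => pvLess deg ((jc : Nat) : Int) x))) := by
  intro L
  induction L with
  | nil =>
    intro cnt res hj
    simp [pvS, List.getD, hj]
  | cons x L ih =>
    intro cnt res hj
    rw [List.foldl_cons]
    by_cases hx : pvLess deg ((jc : Nat) : Int) x
    · rw [if_pos hx]
      have hB1 : (let c := pvUpd cnt ((jc : Nat) : Int) 0 (fun x => x + 1);
            ((c, res + PySem.List.pyGetD c ((jc : Nat) : Int) 0) : List Int × Int))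
          = (cnt.set jc (cnt.getD jc 0 + 1), res + (cnt.getD jc 0 + 1)) := by
        simp only [pvUpd_natCast, PySem.List.pyGetD_natCast]
        rw [pv_getD_set _ jc jc _ _ (by simpa using hj)]
        simp
      rw [hB1, ih _ _ (by simpa using hj)]
      rw [List.set_set, pv_getD_set _ jc jc _ _ (by simpa using hj)]
      simp only [reduceIte]
      rw [List.countP_cons]
      simp only [hx, if_pos]
      simp only [Prod.mk.injEq]
      constructor
      · congr 1; push_cast; ring
      · rw [pvS]; ring
    · rw [if_neg hx, ih _ _ hj, List.countP_cons]
      simp [hx]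

-- characterization of A's adjList2-building fold

theorem pvAdj2 (deg : List Int) :
    ∀ (L : List (List Int)) (s : Nat) (acc : List (List Int)), s + L.length ≤ acc.length →
      ((PySem.List.enumerate L (s : Int)).foldl
        (fun acc p => p.2.foldl (fun acc next =>
          if pvLess deg p.1 next then pvUpd acc p.1 [] (fun l => l ++ [next]) else acc) acc) acc).length = acc.length ∧
      ∀ j : Nat, ((PySem.List.enumerate L (s : Int)).foldl
        (fun acc p => p.2.foldl (fun acc next =>
          if pvLess deg p.1 next then pvUpd acc p.1 [] (fun l => l ++ [next]) else acc) acc) acc).getD j []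
        = if s ≤ j ∧ j < s + L.length
          then acc.getD j [] ++ ((L.getD (j - s) []).filter (fun x => pvLess deg ((j : Nat) : Int) x))
          else acc.getD j [] := by
  intro L
  induction L with
  | nil =>
    intro s acc _
    refine ⟨by simp [PySem.List.enumerate_nil], ?_⟩
    intro j
    simp only [PySem.List.enumerate_nil, List.foldl_nil, List.length_nil]
    rw [if_neg (by omega)]
  | cons l L ih =>
    intro s acc hlen
    have hs : s < acc.length := by simp at hlen; omega
    rw [PySem.List.enumerate_cons, List.foldl_cons]
    dsimp only
    have hcast : ((s : Int) + 1) = ((s + 1 : Nat) : Int) := by push_cast; ring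
    rw [pvInnerApp s (fun x => pvLess deg ((s : Nat) : Int) x) l acc hs, hcast]
    set acc1 := acc.set s (acc.getD s [] ++ l.filter (fun x => pvLess deg ((s : Nat) : Int) x)) with hacc1
    have hlen1 : acc1.length = acc.length := by rw [hacc1]; simp
    obtain ⟨ihl, ihD⟩ := ih (s + 1) acc1 (by rw [hlen1]; simp only [List.length_cons] at hlen; omega)
    refine ⟨by rw [ihl, hlen1], ?_⟩
    intro j
    rw [ihD j]
    by_cases h1 : s + 1 ≤ j ∧ j < s + 1 + L.length
    · rw [if_pos h1, if_pos (by simp only [List.length_cons]; omega)]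
      rw [hacc1, pv_getD_set _ s j _ _ hs, if_neg (by omega)]
      have : j - s = (j - (s + 1)) + 1 := by omega
      rw [this, List.getD_cons_succ]
    · rw [if_neg h1]
      by_cases h2 : j = s
      · rw [h2, if_pos (by simp only [List.length_cons]; omega), hacc1, pv_getD_set _ s s _ _ hs, if_pos rfl]
        simp
      · rw [if_neg (by simp only [List.length_cons]; omega), hacc1, pv_getD_set _ s j _ _ hs, if_neg h2]

def pvM (deg : List Int) (adj2 : List (List Int)) (c : Nat) (l : List Int) : Nat :=
  (l.flatMap (fun a => PySem.List.pyGetD adj2 a [])).countP (fun x => pvLess deg ((c : Nat) : Int) x)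

-- A's main double loop: the returned res

theorem pvLoopA (deg : List Int) (adj2 : List (List Int)) :
    ∀ (L : List (List Int)) (s : Nat) (cnt : List Int) (res : Int),
      s + L.length ≤ cnt.length →
      (∀ j : Nat, s ≤ j → cnt.getD j 0 = 0) →
      ((PySem.List.enumerate L (s : Int)).foldl
        (fun (st : List Int × Int) p =>
          p.2.foldl (fun st next1 =>
            (PySem.List.pyGetD adj2 next1 []).foldl (fun (st : List Int × Int) next2 =>
              if pvLess deg p.1 next2 then
                let c := pvUpd st.1 p.1 0 (fun x => x + 1)
                (c, st.2 + PySem.List.pyGetD c p.1 0)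
              else st) st) st) (cnt, res)).2
      = res + ∑ k ∈ Finset.range L.length, pvT ((pvM deg adj2 (s + k) (L.getD k []) : Nat) : Int) := by
  intro L
  induction L with
  | nil =>
    intro s cnt res _ _
    simp [PySem.List.enumerate_nil]
  | cons l L ih =>
    intro s cnt res hlen hz
    have hs : s < cnt.length := by simp at hlen; omega
    rw [PySem.List.enumerate_cons, List.foldl_cons]
    dsimp only
    have hcast : ((s : Int) + 1) = ((s + 1 : Nat) : Int) := by push_cast; ring
    rw [← List.foldl_flatMap, pvLoopInner deg s _ cnt res hs, hz s le_rfl, pvS_zero, hcast]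
    rw [show (0 : Int) + ((l.flatMap (fun a => PySem.List.pyGetD adj2 a [])).countP (fun x => pvLess deg ((s : Nat) : Int) x) : Int) = ((pvM deg adj2 s l : Nat) : Int) by rw [pvM]; norm_num]
    rw [show pvT ((l.flatMap (fun a => PySem.List.pyGetD adj2 a [])).countP (fun x => pvLess deg ((s : Nat) : Int) x) : Int) = pvT ((pvM deg adj2 s l : Nat) : Int) by rw [pvM]]
    set cnt1 := cnt.set s ((pvM deg adj2 s l : Nat) : Int) with hcnt1
    have hlen1 : cnt1.length = cnt.length := by rw [hcnt1]; simp
    have hle1 : s + 1 + L.length ≤ cnt1.length := by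
      rw [hlen1]; simp only [List.length_cons] at hlen; omega
    have hz1 : ∀ j : Nat, s + 1 ≤ j → cnt1.getD j 0 = 0 := by
      intro j hj
      rw [hcnt1, pv_getD_set _ s j _ _ hs, if_neg (by omega)]
      exact hz j (by omega)
    rw [ih (s + 1) cnt1 _ hle1 hz1]
    have hsum : ∑ k ∈ Finset.range (l :: L).length, pvT ((pvM deg adj2 (s + k) ((l :: L).getD k []) : Nat) : Int)
        = pvT ((pvM deg adj2 s l : Nat) : Int)
          + ∑ k ∈ Finset.range L.length, pvT ((pvM deg adj2 (s + 1 + k) (L.getD k []) : Nat) : Int) := by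
      rw [List.length_cons, Finset.sum_range_succ', add_comm]
      simp only [List.getD_cons_succ, List.getD_cons_zero, Nat.add_zero]
      congr 1
      apply Finset.sum_congr rfl
      intro k _
      have h1 : s + (k + 1) = s + 1 + k := by omega
      rw [h1]
    rw [hsum]
    ring

-- decomposition of one build step on the adjacency component

theorem pvStep2 (a : List (List Int)) (ju jv : Nat)
    (hju : ju < a.length) (hjv : jv < a.length) (i : Nat) :
    (pvUpd (pvUpd a (ju:Int) [] (fun l => l ++ [(jv:Int)])) (jv:Int) [] (fun l => l ++ [(ju:Int)])).getD i []
      = a.getD i [] ++ (if i = ju then [(jv:Int)] else []) ++ (if i = jv then [(ju:Int)] else []) := by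
  rw [pvUpd_natCast, pvUpd_natCast]
  rw [pv_getD_set _ jv i _ _ (by simpa using hjv)]
  rw [pv_getD_set _ ju jv _ _ hju, pv_getD_set _ ju i _ _ hju]
  split_ifs <;> simp_all

-- build invariant: lengths and canonical neighbour values

def pvInv (n : Int) (s : List (List Int) × List Int) : Prop :=
  s.1.length = n.toNat ∧ s.2.length = n.toNat ∧
  (∀ i : Nat, ∀ x ∈ s.1.getD i [], 0 ≤ x ∧ x < n)

theorem pvFold_inv (n : Int) (es : List (List Int)) :
    ∀ (s : List (List Int) × List Int),
      (∀ e ∈ es, e.length = 2 ∧ ∀ x ∈ e, 0 ≤ x ∧ x < n) → pvInv n s →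
      pvInv n (es.foldl (fun s e =>
        match e with
        | [u, v] =>
          let a1 := pvUpd s.1 u [] (fun l => l ++ [v])
          let a2 := pvUpd a1 v [] (fun l => l ++ [u])
          let d1 := pvUpd s.2 u 0 (fun x => x + 1)
          let d2 := pvUpd d1 v 0 (fun x => x + 1)
          (a2, d2)
        | _ => s) s) := by
  induction es with
  | nil => intro s _ hs; simpa using hs
  | cons e es ih =>
    intro s hP hs
    have he := hP e (by simp)
    rcases e with _ | ⟨u, _ | ⟨v, _ | _⟩⟩ <;> simp at he
    obtain ⟨⟨hu0, hun⟩, hv0, hvn⟩ := he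
    set ju := u.toNat with hju
    set jv := v.toNat with hjv
    have hu : u = (ju : Int) := by omega
    have hv : v = (jv : Int) := by omega
    obtain ⟨hl1, hl2, hcan⟩ := hs
    have hjul : ju < s.1.length := by omega
    have hjvl : jv < s.1.length := by omega
    rw [List.foldl_cons]
    apply ih _ (fun e he => hP e (by simp [he]))
    have hdecomp : ∀ i : Nat,
        (pvUpd (pvUpd s.1 u [] (fun l => l ++ [v])) v [] (fun l => l ++ [u])).getD i []
        = s.1.getD i [] ++ (if i = ju then [(jv:Int)] else []) ++ (if i = jv then [(ju:Int)] else []) := by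
      intro i
      rw [hu, hv]
      exact pvStep2 s.1 ju jv hjul hjvl i
    refine ⟨?_, ?_, ?_⟩
    · simp [pv_length_pvUpd, hl1]
    · simp [pv_length_pvUpd, hl2]
    · intro i x hx
      rw [hdecomp i] at hx
      simp only [List.mem_append] at hx
      rcases hx with (hx | hx) | hx
      · exact hcan i x hx
      · split at hx <;> simp at hx
        subst hx; constructor <;> omega
      · split at hx <;> simp at hx
        subst hx; constructor <;> omega

theorem pvBuild_inv (n : Int) (edges : List (List Int))
    (hP : ∀ e ∈ edges, e.length = 2 ∧ ∀ x ∈ e, 0 ≤ x ∧ x < n) :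
    pvInv n (pvBuild n edges) := by
  apply pvFold_inv n edges _ hP
  refine ⟨by simp, by simp, ?_⟩
  intro i x hx
  have : (List.replicate n.toNat ([]:List Int)).getD i [] = [] := pv_getD_replicate _ _ _
  rw [this] at hx
  simp at hx

theorem pvCountP_flatMap (p : Int → Bool) (f : Int → List Int) :
    ∀ l : List Int, (l.flatMap f).countP p = (l.map (fun x => (f x).countP p)).sum := by
  intro l
  induction l with
  | nil => simp
  | cons x l ih => simp [List.countP_append, ih]

-- ---- B-side lemmas ----

-- pvLtP on (deg-key, id) pairs IS A's 'less'
theorem pvLtP_less (deg : List Int) (u v : Int) :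
    pvLtP (PySem.List.pyGetD deg u 0, u) (PySem.List.pyGetD deg v 0, v) = pvLess deg u v := rfl

-- strictly-above-the-max test: ¬(x ≤ max(p,q)) is (p < x) ∧ (q < x)
theorem pvGt_max (p q x : Int × Int) :
    (!pvLeP x (if pvLtP p q then q else p)) = (pvLtP p x && pvLtP q x) := by
  obtain ⟨p1, p2⟩ := p; obtain ⟨q1, q2⟩ := q; obtain ⟨x1, x2⟩ := x
  rw [Bool.eq_iff_iff]
  by_cases h : pvLtP (p1, p2) (q1, q2)
  · rw [if_pos h]
    simp only [pvLeP, pvLtP, Bool.not_or, Bool.and_eq_true, Bool.not_eq_true',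
      Bool.or_eq_true, decide_eq_true_eq, decide_eq_false_iff_not, beq_iff_eq,
      Bool.and_eq_false_iff, beq_eq_false_iff_ne, ne_eq] at h ⊢
    omega
  · rw [if_neg h]
    simp only [pvLeP, pvLtP, Bool.not_or, Bool.and_eq_true, Bool.not_eq_true',
      Bool.or_eq_true, decide_eq_true_eq, decide_eq_false_iff_not, beq_iff_eq,
      Bool.and_eq_false_iff, beq_eq_false_iff_ne, ne_eq] at h ⊢
    omega

-- the sorted2 output of Source B is pairwise ≤ in Python's tuple order
theorem pv_sorted2_pairwise (xs : List (Int × Int)) :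
    List.Pairwise (fun a b => pvLeP a b = true)
      (PySem.List.sorted2 xs Prod.fst Prod.snd false) := by
  have hb : (fun a b : Int × Int => decide (a.1 < b.1) || (!decide (b.1 < a.1) && decide (a.2 < b.2)))
      = fun a b : Int × Int => decide (toLex a < toLex b) := by
    funext a b
    rw [Bool.eq_iff_iff]
    simp only [Bool.or_eq_true, Bool.and_eq_true, Bool.not_eq_true', decide_eq_true_eq,
      decide_eq_false_iff_not, Prod.Lex.lt_iff, ofLex_toLex]
    omega
  have hrepr : PySem.List.sorted2 xs Prod.fst Prod.snd false
      = xs.foldl (fun acc x => PySem.List.insertBy (fun a b : Int × Int => decide (toLex a < toLex b)) x acc) [] := by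
    simp only [PySem.List.sorted2]
    rw [hb]
    simp
  rw [hrepr]
  have hpl : ∀ (l : List (Int × Int)) (acc : List (Int × Int)),
      List.Pairwise (fun a b : Int × Int => toLex a ≤ toLex b) acc →
      List.Pairwise (fun a b : Int × Int => toLex a ≤ toLex b)
        (l.foldl (fun acc x => PySem.List.insertBy (fun a b : Int × Int => decide (toLex a < toLex b)) x acc) acc) := by
    intro l
    induction l with
    | nil => intro acc h; simpa using h
    | cons x l ih =>
      intro acc h
      rw [List.foldl_cons]
      exact ih _ (PySem.List.insertBy_pairwise_le (fun p : Int × Int => toLex p) x acc h)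
  refine (hpl xs [] (by simp)).imp ?_
  intro a b h
  rw [Prod.Lex.le_iff] at h
  simp only [ofLex_toLex] at h
  simp only [pvLeP, Bool.or_eq_true, Bool.and_eq_true, decide_eq_true_eq, beq_iff_eq]
  omega

-- pvLeP is transitive enough for the monotone prefix argument
theorem pvLeP_trans (a b c : Int × Int) (h1 : pvLeP a b = true) (h2 : pvLeP b c = true) :
    pvLeP a c = true := by
  obtain ⟨a1, a2⟩ := a; obtain ⟨b1, b2⟩ := b; obtain ⟨c1, c2⟩ := c
  simp only [pvLeP, Bool.or_eq_true, Bool.and_eq_true, decide_eq_true_eq, beq_iff_eq] at h1 h2 ⊢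
  omega

-- the binary search returns the length of the ≤t prefix of a sorted list
theorem pvBS_inv (ks : List (Int × Int)) (t : Int × Int)
    (hmono : ∀ i j : Nat, i ≤ j → j < ks.length →
      pvLeP (ks.getD j (0, 0)) t = true → pvLeP (ks.getD i (0, 0)) t = true) :
    ∀ (d lo hi : Nat), hi - lo = d → lo ≤ hi → hi ≤ ks.length →
      (∀ i : Nat, i < lo → pvLeP (ks.getD i (0, 0)) t = true) →
      (∀ i : Nat, hi ≤ i → i < ks.length → ¬ pvLeP (ks.getD i (0, 0)) t = true) →
      lo ≤ pvBS ks t lo hi ∧ pvBS ks t lo hi ≤ hi ∧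
      (∀ i : Nat, i < ks.length → (pvLeP (ks.getD i (0, 0)) t = true ↔ i < pvBS ks t lo hi)) := by
  intro d
  induction d using Nat.strong_induction_on with
  | _ d ih =>
    intro lo hi hd hlohi hhi hbelow habove
    by_cases h : lo < hi
    · rw [pvBS, if_pos h]
      set mid := (lo + hi) / 2 with hmid
      have hm1 : lo ≤ mid := by omega
      have hm2 : mid < hi := by omega
      by_cases hp : pvLeP (ks.getD mid (0, 0)) t = true
      · rw [if_pos hp]
        have hrec := ih (hi - (mid + 1)) (by omega) (mid + 1) hi rfl (by omega) hhi
          (fun i hi' => by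
            rcases Nat.lt_or_ge i lo with h' | h'
            · exact hbelow i h'
            · exact hmono i mid (by omega) (by omega) hp)
          habove
        exact ⟨by omega, by omega, hrec.2.2⟩
      · rw [if_neg hp]
        have hrec := ih (mid - lo) (by omega) lo mid rfl (by omega) (by omega)
          hbelow
          (fun i hi1 hi2 => fun hc => hp (hmono mid i hi1 hi2 hc))
        exact ⟨hrec.1, by omega, hrec.2.2⟩
    · rw [pvBS, if_neg h]
      have hle : lo = hi := by omega
      refine ⟨le_rfl, by omega, ?_⟩
      intro i hilen
      constructor
      · intro hpi
        by_contra hge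
        exact habove i (by omega) hilen hpi
      · intro hi'
        exact hbelow i hi'

-- a predicate true exactly on the first r positions has countP r
theorem pv_countP_prefix {α : Type} (p : α → Bool) :
    ∀ (ks : List α) (r : Nat), r ≤ ks.length →
      (∀ i : Nat, (h : i < ks.length) → (p ks[i] = true ↔ i < r)) →
      ks.countP p = r := by
  intro ks
  induction ks with
  | nil => intro r hr _; simp at hr ⊢; omega
  | cons x ks ih =>
    intro r hr hc
    rcases r with _ | s
    · have hall : ∀ a ∈ x :: ks, ¬ p a = true := by
        intro a ha hp
        obtain ⟨i, hi, rfl⟩ := List.mem_iff_getElem.mp ha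
        have := (hc i hi).mp hp
        omega
      rw [List.countP_eq_zero.mpr hall]
    · rw [List.countP_cons]
      have hx : p x = true := (hc 0 (by simp)).mpr (by omega)
      have hks : ks.countP p = s := by
        apply ih s (by simpa using hr)
        intro i hi
        have := hc (i + 1) (by simpa using Nat.succ_lt_succ hi)
        simpa [Nat.succ_lt_succ_iff] using this
      rw [hks]
      simp [hx]

-- Source B's binary-search count on a sorted key list = count of elements strictly above t
theorem pvBS_count (ks : List (Int × Int)) (t : Int × Int)
    (hsort : List.Pairwise (fun a b => pvLeP a b = true) ks) :
    ((ks.length : Int) - ((pvBS ks t 0 ks.length : Nat) : Int))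
      = ((ks.countP (fun x => !pvLeP x t) : Nat) : Int) := by
  have hmono : ∀ i j : Nat, i ≤ j → j < ks.length →
      pvLeP (ks.getD j (0, 0)) t = true → pvLeP (ks.getD i (0, 0)) t = true := by
    intro i j hij hj hpj
    rcases Nat.eq_or_lt_of_le hij with rfl | hlt
    · exact hpj
    · have hij' := (List.pairwise_iff_getElem.mp hsort) i j (by omega) hj hlt
      rw [List.getD_eq_getElem _ _ (by omega : i < ks.length), List.getD_eq_getElem _ _ hj] at *
      exact pvLeP_trans _ _ _ hij' hpj
  obtain ⟨h1, h2, h3⟩ := pvBS_inv ks t hmono (ks.length - 0) 0 ks.length rfl (by omega) le_rfl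
    (by omega) (by omega)
  have hcle : ks.countP (fun x => pvLeP x t) = pvBS ks t 0 ks.length := by
    apply pv_countP_prefix _ ks _ h2
    intro i hi
    have := h3 i hi
    rw [List.getD_eq_getElem _ _ hi] at this
    exact this
  have hsplit : ks.countP (fun x => pvLeP x t) + ks.countP (fun x => !pvLeP x t) = ks.length := by
    have := List.length_eq_countP_add_countP (fun x => pvLeP x t) (l := ks)
    simp only [decide_not, Bool.decide_eq_true] at this ⊢
    omega
  omega

-- ---- assembly ----

theorem pvMain (n : Int) (edges : List (List Int))
    (hPre : ∀ e ∈ edges, e.length = 2 ∧ ∀ x ∈ e, 0 ≤ x ∧ x < n) :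
    countCycle4 n edges = countCycle4_alt n edges := by
  obtain ⟨hA1, hA2, hcanI⟩ := pvBuild_inv n edges hPre
  simp only [countCycle4, countCycle4_alt]
  set N := n.toNat with hN
  set Aa := (pvBuild n edges).1 with hAa
  set deg := (pvBuild n edges).2 with hdeg
  have hcan : ∀ i : Nat, ∀ x ∈ Aa.getD i [], 0 ≤ x ∧ x.toNat < N := by
    intro i x hx; obtain ⟨h1, h2⟩ := hcanI i x hx; exact ⟨h1, by omega⟩
  -- A side: res = Σ_{cur<N} T(M_cur)
  have e0 : PySem.List.enumerate Aa (0 : Int) = PySem.List.enumerate Aa (((0 : Nat)) : Int) := by norm_num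
  rw [e0]
  rw [pvLoopA deg _ Aa 0 (List.replicate N (0 : Int)) 0
    (by simp [hA1]) (fun j _ => pv_getD_replicate N j 0)]
  -- characterize A's adjList2
  obtain ⟨hadjL, hadjD⟩ := pvAdj2 deg Aa 0 (List.replicate N ([] : List Int)) (by simp [hA1])
  have hadj : ∀ j : Nat,
      ((PySem.List.enumerate Aa (((0 : Nat)) : Int)).foldl
        (fun acc p => p.2.foldl (fun acc next =>
          if pvLess deg p.1 next then pvUpd acc p.1 [] (fun l => l ++ [next]) else acc) acc)
        (List.replicate N ([] : List Int))).getD j []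
      = (Aa.getD j []).filter (fun x => pvLess deg ((j : Nat) : Int) x) := by
    intro j
    rw [hadjD j]
    by_cases h : 0 ≤ j ∧ j < 0 + Aa.length
    · rw [if_pos h, pv_getD_replicate N j ([] : List Int)]
      simp
    · rw [if_neg h, pv_getD_replicate N j ([] : List Int)]
      have hj : Aa.length ≤ j := by omega
      rw [List.getD_eq_default _ _ hj]
      simp
  -- name A's oriented adjacency list
  set adj2 := (PySem.List.enumerate Aa (((0 : Nat)) : Int)).foldl
    (fun acc p => p.2.foldl (fun acc next =>
      if pvLess deg p.1 next then pvUpd acc p.1 [] (fun l => l ++ [next]) else acc) acc)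
    (List.replicate N ([] : List Int)) with hadj2def
  have hadj : ∀ j : Nat, adj2.getD j []
      = (Aa.getD j []).filter (fun x => pvLess deg ((j : Nat) : Int) x) := by
    intro j
    rw [hadj2def, hadjD j]
    by_cases h : 0 ≤ j ∧ j < 0 + Aa.length
    · rw [if_pos h, pv_getD_replicate N j ([] : List Int)]
      simp
    · rw [if_neg h, pv_getD_replicate N j ([] : List Int)]
      have hj : Aa.length ≤ j := by omega
      rw [List.getD_eq_default _ _ hj]
      simp
  -- B side: rewrite the range and the outer fold into a sum of pvT terms
  have hpyr : PySem.List.pyRange 0 n 1 = (List.range N).map (fun m => ((m : Nat) : Int)) := by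
    rw [PySem.List.pyRange_one]
    simp [hN]
  rw [hpyr]
  -- per-vertex wedge total of B
  set KB : Int → Int := fun cur =>
    (PySem.List.pyGetD Aa cur []).foldl (fun k a =>
      let t0 : Int × Int := (PySem.List.pyGetD deg a 0, a)
      let t := if pvLtP t0 (PySem.List.pyGetD deg cur 0, cur) then (PySem.List.pyGetD deg cur 0, cur) else t0
      let ks := PySem.List.pyGetD (Aa.map (fun nbrs =>
        PySem.List.sorted2 (nbrs.map (fun w => (PySem.List.pyGetD deg w 0, w))) Prod.fst Prod.snd false)) a []
      let lo := pvBS ks t 0 ks.length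
      k + ((ks.length : Int) - (lo : Int))) 0 with hKB
  conv_rhs => change (((List.range N).map (fun m => ((m : Nat) : Int))).foldl (fun res cur => res + PySem.Int.floordiv (KB cur * (KB cur + 1)) 2) 0)
  rw [PySem.List.foldl_add (g := fun cur => PySem.Int.floordiv (KB cur * (KB cur + 1)) 2)]
  rw [List.map_map, hA1]
  have hlistsum : ((List.range N).map ((fun cur => PySem.Int.floordiv (KB cur * (KB cur + 1)) 2)
      ∘ (fun m : Nat => ((m : Nat) : Int)))).sum
      = ∑ k ∈ Finset.range N, PySem.Int.floordiv (KB ((k : Nat) : Int) * (KB ((k : Nat) : Int) + 1)) 2 := rfl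
  rw [hlistsum, zero_add, zero_add]
  apply Finset.sum_congr rfl
  intro cur hcur
  have hcurN : cur < N := Finset.mem_range.mp hcur
  -- reduce B's per-vertex total to a sum of counts
  have hKBv : KB ((cur : Nat) : Int)
      = (((Aa.getD cur []).map (fun a =>
          ((Aa.getD a.toNat []).countP (fun w =>
            pvLess deg a w && pvLess deg ((cur : Nat) : Int) w) : Int))).sum) := by
    set nk := Aa.map (fun nbrs =>
      PySem.List.sorted2 (nbrs.map (fun w => (PySem.List.pyGetD deg w 0, w))) Prod.fst Prod.snd false) with hnk
    set cx : Int × Int := (PySem.List.pyGetD deg ((cur : Nat) : Int) 0, ((cur : Nat) : Int)) with hcx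
    set F : Int → Int := fun a =>
      (((PySem.List.pyGetD nk a []).length : Int)
        - ((pvBS (PySem.List.pyGetD nk a [])
            (if pvLtP (PySem.List.pyGetD deg a 0, a) cx then cx else (PySem.List.pyGetD deg a 0, a))
            0 (PySem.List.pyGetD nk a []).length : Nat) : Int)) with hF
    rw [hKB]
    conv_lhs => change ((PySem.List.pyGetD Aa ((cur : Nat) : Int) []).foldl (fun k a => k + F a) 0)
    rw [PySem.List.foldl_add (g := F), PySem.List.pyGetD_natCast]
    rw [zero_add]
    apply congrArg List.sum
    apply List.map_congr_left
    intro a ha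
    obtain ⟨ha0, haN⟩ := hcan cur a ha
    have hacast : a = ((a.toNat : Nat) : Int) := by omega
    simp only [hF]
    rw [hacast, PySem.List.pyGetD_natCast, hnk,
      List.getD_eq_getElem _ _ (by rw [List.length_map, hA1]; exact haN), List.getElem_map,
      ← List.getD_eq_getElem _ ([] : List Int) (by rw [hA1]; exact haN)]
    set ks := PySem.List.sorted2 ((Aa.getD a.toNat []).map (fun w => (PySem.List.pyGetD deg w 0, w)))
      Prod.fst Prod.snd false with hks
    set t := (if pvLtP (PySem.List.pyGetD deg ((a.toNat : Nat) : Int) 0, ((a.toNat : Nat) : Int)) cx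
        then cx
        else (PySem.List.pyGetD deg ((a.toNat : Nat) : Int) 0, ((a.toNat : Nat) : Int))) with ht
    rw [pvBS_count ks t (pv_sorted2_pairwise _)]
    congr 1
    have hperm : ks.Perm ((Aa.getD a.toNat []).map (fun w => (PySem.List.pyGetD deg w 0, w))) :=
      PySem.List.sorted2_perm _ _ _ _
    rw [List.Perm.countP_eq _ hperm, List.countP_map]
    apply List.countP_congr
    intro w _
    have hbe : ((fun x => !pvLeP x t) ∘ fun w => (PySem.List.pyGetD deg w 0, w)) w
        = (pvLess deg ((a.toNat : Nat) : Int) w && pvLess deg ((cur : Nat) : Int) w) := by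
      show (!pvLeP (PySem.List.pyGetD deg w 0, w) t) = _
      rw [ht, hcx, pvGt_max, pvLtP_less, pvLtP_less]
    rw [hbe]
  show pvT ((pvM deg adj2 (0 + cur) (Aa.getD cur []) : Nat) : Int) = pvT (KB ((cur : Nat) : Int))
  rw [hKBv]
  congr 1
  rw [pvM, pvCountP_flatMap]
  have hmapc : (Aa.getD cur []).map (fun x =>
        (PySem.List.pyGetD adj2 x []).countP (fun y => pvLess deg (((0 + cur : Nat)) : Int) y)) =
      (Aa.getD cur []).map (fun a =>
        (Aa.getD a.toNat []).countP (fun w =>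
          pvLess deg a w && pvLess deg ((cur : Nat) : Int) w)) := by
    apply List.map_congr_left
    intro a ha
    obtain ⟨ha0, haN⟩ := hcan cur a ha
    have hacast : a = ((a.toNat : Nat) : Int) := by omega
    rw [hacast, PySem.List.pyGetD_natCast, hadj a.toNat, List.countP_filter]
    have hz : ((0 + cur : Nat) : Int) = ((cur : Nat) : Int) := by push_cast; ring
    rw [hz]
    apply List.countP_congr
    intro w _
    rw [Bool.and_comm]
  rw [hmapc]
  have hcast2 : ∀ (l : List Nat), ((l.sum : Nat) : Int) = (l.map (fun m : Nat => (m : Int))).sum := by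
    intro l
    induction l with
    | nil => simp
    | cons x l ih => simp [ih]
  rw [hcast2, List.map_map]
  rfl

-- ===== VERDICT (by name: the statement is the Claim_ definition above) =====
theorem countCycle4_spec : Claim_equal_countCycle4 := by
  intro n edges _ hPre
  exact pvMain n edges hPre
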